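-- pv_equiv track=rewrite | github.com/AP-MI-2021/lab-4-MarcusPaul16 | main.py | inserare_divizori_proprii
-- ===== SOURCE A (Python) =====
-- def inserare_divizori_proprii(lst:list[int]):
--     '''
--     Insereaza in lista data, dupa fiecare element, divizorii sai proprii
--     :param lst: lista de numere intregi
--     :return: returneaza lista careia s-au adaugat divizorii proprii
--     '''
--     count = 0
--     i = 0
--     lungime = len(lst)
--     while i < lungime:
--         count = 0
--         for j in range(2, lst[i] // 2 + 1):
--             if lst[i] % j == 0:
--                 count += 1
--                 lst.insert(i + count, j)
--         i = i + 1 + count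
--         lungime = len(lst)
--     return lst
-- ===== SOURCE B (Python) =====
-- def inserare_divizori_proprii(lst):
--     '''
--     Insereaza in lista data, dupa fiecare element, divizorii sai proprii
--     (mutates lst in place like the original, via slice assignment).
--     '''
--     out = []
--     for n in lst:
--         out.append(n)
--         small = []
--         large = []
--         d = 2
--         while d * d <= n:
--             if n % d == 0:
--                 small.append(d)
--                 q = n // d
--                 if q != d:
--                     large.append(q)
--             d += 1
--         out.extend(small)
--         out.extend(reversed(large))
--     lst[:] = out
--     return lst
-- ===== Notes on version B (the rewrite author's own statement) =====
-- stated objective: faster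
-- what changed: B replaces A's in-place while-loop that scans every candidate j in [2, n//2] for each element with a rebuild that finds each element's proper divisors by trial division up to sqrt(n), collecting divisor/cofactor pairs and emitting them in sorted order.
import Mathlib
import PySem

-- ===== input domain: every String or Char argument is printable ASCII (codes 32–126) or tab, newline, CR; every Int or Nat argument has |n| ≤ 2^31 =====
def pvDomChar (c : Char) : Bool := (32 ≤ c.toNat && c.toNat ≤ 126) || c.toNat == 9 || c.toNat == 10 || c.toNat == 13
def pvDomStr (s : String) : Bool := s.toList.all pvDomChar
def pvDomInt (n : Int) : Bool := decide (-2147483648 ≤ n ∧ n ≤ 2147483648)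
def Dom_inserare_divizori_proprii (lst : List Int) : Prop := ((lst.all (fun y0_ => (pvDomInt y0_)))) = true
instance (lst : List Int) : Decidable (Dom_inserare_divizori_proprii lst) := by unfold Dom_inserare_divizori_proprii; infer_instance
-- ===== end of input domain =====

-- B finds each element's proper divisors by trial division up to sqrt(n) instead of
-- scanning all of [2, n//2] with in-place insertions; A mutates lst in place (B's Python
-- mirrors that via slice assignment) — the equivalence proved here is about the return value.

-- ===== PORT A =====
-- the body of A's inner 'for j in range(...)' loop: state = (count, lst); i is the outer index
def pvInnerStepA (i : Nat) (st : Nat × List Int) (j : Int) : Nat × List Int :=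
  if PySem.Int.mod ((PySem.List.pyGet? st.2 (i : Int)).getD 0) j == 0 then
    (st.1 + 1, PySem.List.insert st.2 ((i + st.1 + 1 : Nat) : Int) j)
  else st

-- length invariant of the inner loop (cited by loopA's decreasing_by)
theorem pvInnerStepA_len (i : Nat) (js : List Int) :
    ∀ (c : Nat) (l0 : List Int),
      (js.foldl (pvInnerStepA i) (c, l0)).2.length + c =
      (js.foldl (pvInnerStepA i) (c, l0)).1 + l0.length := by
  induction js with
  | nil => intro c l0; simp; omega
  | cons j js ih =>
      intro c l0
      simp only [List.foldl_cons, pvInnerStepA]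
      split
      · have := ih (c + 1) (PySem.List.insert l0 ((i + c + 1 : Nat) : Int) j)
        simp only [PySem.List.length_insert] at this
        omega
      · exact ih c l0

-- A's outer while loop
def pvLoopA (l : List Int) (i : Nat) : List Int :=
  if h : i < l.length then
    let x := (PySem.List.pyGet? l (i : Int)).getD 0
    let st := (PySem.List.pyRange 2 (PySem.Int.floordiv x 2 + 1) 1).foldl (pvInnerStepA i) (0, l)
    pvLoopA st.2 (i + 1 + st.1)
  else l
termination_by l.length - i
decreasing_by
  have h2 := pvInnerStepA_len i (PySem.List.pyRange 2 (PySem.Int.floordiv ((PySem.List.pyGet? l (i : Int)).getD 0) 2 + 1) 1) 0 l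
  omega

def inserare_divizori_proprii (lst : List Int) : List Int := pvLoopA lst 0

-- ===== PORT B =====
-- B's inner 'while d * d <= n' trial-division loop: collects small divisors (ascending)
-- and their cofactors (descending)
def pvTrialLoop (n : Int) (d : Nat) (small large : List Int) : List Int × List Int :=
  if h : (d : Int) * d ≤ n then
    if PySem.Int.mod n d == 0 then
      let q := PySem.Int.floordiv n d
      pvTrialLoop n (d + 1) (small ++ [(d : Int)]) (if q ≠ (d : Int) then large ++ [q] else large)
    else
      pvTrialLoop n (d + 1) small large
  else (small, large)
termination_by n.toNat + 1 - d
decreasing_by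
  all_goals
    rcases Nat.eq_zero_or_pos d with hd | hd
    · subst hd; simp at h; omega
    · have hdd : (d : Int) ≤ (d : Int) * d := le_mul_of_one_le_right (by positivity) (by exact_mod_cast hd)
      have : (d : Int) ≤ n := le_trans hdd h
      omega

def inserare_divizori_proprii_alt (lst : List Int) : List Int :=
  lst.foldl (fun out n =>
    let sl := pvTrialLoop n 2 [] []
    out ++ ([n] ++ sl.1 ++ sl.2.reverse)) []

-- ===== PRECONDITION & SPEC =====
def Spec_inserare_divizori_proprii (lst : List Int) (out : List Int) : Prop := out = inserare_divizori_proprii_alt lst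
instance (lst : List Int) (out : List Int) : Decidable (Spec_inserare_divizori_proprii lst out) := by unfold Spec_inserare_divizori_proprii; infer_instance

-- ===== CLAIM (what is proved, stated in full; the proofs are below) =====
def Claim_equal_inserare_divizori_proprii : Prop := ∀ (lst : List Int), Dom_inserare_divizori_proprii lst → Spec_inserare_divizori_proprii lst (inserare_divizori_proprii lst)

-- ===== LEMMAS AND PROOFS =====

-- A's list of proper divisors of n, in the order A inserts them
def pvDivsA (n : Int) : List Int :=
  (PySem.List.pyRange 2 (PySem.Int.floordiv n 2 + 1) 1).filter (fun j => PySem.Int.mod n j == 0)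

-- the small-divisor and cofactor lists pvTrialLoop accumulates, as filters of a Nat range
def pvSF (N d : Nat) : List Int :=
  List.map (fun j => ((j : Nat) : Int)) ((List.range' d (Nat.sqrt N + 1 - d)).filter (fun j => N % j == 0))
def pvLF (N d : Nat) : List Int :=
  List.map (fun j => ((N / j : Nat) : Int))
    ((List.range' d (Nat.sqrt N + 1 - d)).filter (fun j => N % j == 0 && N / j != j))

theorem pvTrialLoop_spec (N : Nat) :
    ∀ (k d : Nat), k = Nat.sqrt N + 1 - d → 1 ≤ d → ∀ (s l : List Int),
      pvTrialLoop (N : Int) d s l = (s ++ pvSF N d, l ++ pvLF N d) := by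
  intro k
  induction k with
  | zero =>
      intro d hk hd s l
      have hgt : Nat.sqrt N < d := by omega
      have hnot : ¬ ((d : Int) * d ≤ (N : Int)) := by
        have := Nat.sqrt_lt.mp hgt
        push_cast
        exact_mod_cast not_le.mpr (by exact_mod_cast this)
      rw [pvTrialLoop, dif_neg hnot]
      simp [pvSF, pvLF, show Nat.sqrt N + 1 - d = 0 by omega]
  | succ k ih =>
      intro d hk hd s l
      have hle : d ≤ Nat.sqrt N := by omega
      have hcond : (d : Int) * d ≤ (N : Int) := by exact_mod_cast Nat.le_sqrt.mp hle
      rw [pvTrialLoop, dif_pos hcond]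
      have hmod : PySem.Int.mod (N : Int) (d : Nat) = ((N % d : Nat) : Int) := PySem.Int.mod_natCast N d
      have hdiv : PySem.Int.floordiv (N : Int) (d : Nat) = ((N / d : Nat) : Int) := PySem.Int.floordiv_natCast N d
      have hrange : List.range' d (Nat.sqrt N + 1 - d) = d :: List.range' (d + 1) (Nat.sqrt N + 1 - (d + 1)) := by
        rw [show Nat.sqrt N + 1 - d = (Nat.sqrt N + 1 - (d+1)) + 1 by omega, List.range'_succ]
      by_cases hm : N % d = 0
      · rw [if_pos (by simp [hmod, hm])]
        show pvTrialLoop (N : Int) (d + 1) (s ++ [(d : Int)])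
            (if PySem.Int.floordiv (N : Int) (d : Nat) ≠ (d : Int) then
              l ++ [PySem.Int.floordiv (N : Int) (d : Nat)] else l) = _
        rw [hdiv]
        by_cases hq : N / d = d
        · rw [if_neg (by simp [hq])]
          rw [ih (d+1) (by omega) (by omega)]
          simp [pvSF, pvLF, hrange, hm, hq]
        · rw [if_pos (by simp; exact_mod_cast hq)]
          rw [ih (d+1) (by omega) (by omega)]
          simp [pvSF, pvLF, hrange, hm, hq]
      · rw [if_neg (by rw [hmod]; simp; intro hdv; exact hm (Nat.mod_eq_zero_of_dvd (by exact_mod_cast hdv)))]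
        rw [ih (d+1) (by omega) (by omega)]
        simp [pvSF, pvLF, hrange, hm]

theorem pvKey (N : Nat) (hN : 4 ≤ N) (x : Nat) :
    (∃ j, 2 ≤ j ∧ j ≤ Nat.sqrt N ∧ N % j = 0 ∧ (x = j ∨ (N / j ≠ j ∧ x = N / j)))
    ↔ (2 ≤ x ∧ x ≤ N / 2 ∧ N % x = 0) := by
  have hs2 : 2 ≤ Nat.sqrt N := Nat.le_sqrt.mpr (by omega)
  have hss : Nat.sqrt N * Nat.sqrt N ≤ N := Nat.sqrt_le N
  constructor
  · rintro ⟨j, h2j, hjs, hmod, hx⟩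
    have hjd : j ∣ N := Nat.dvd_of_mod_eq_zero hmod
    rcases hx with rfl | ⟨hne, rfl⟩
    · refine ⟨h2j, ?_, hmod⟩
      have h1 : x * x ≤ N := Nat.le_sqrt.mp hjs
      have h2 : x * 2 ≤ N := le_trans (Nat.mul_le_mul_left x h2j) h1
      exact (Nat.le_div_iff_mul_le (by omega)).mpr h2
    · refine ⟨?_, Nat.div_le_div_left h2j (by omega),
        Nat.mod_eq_zero_of_dvd (Nat.div_dvd_of_dvd hjd)⟩
      have h1 : Nat.sqrt N ≤ N / Nat.sqrt N := (Nat.le_div_iff_mul_le (by omega)).mpr hss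
      have h2 : N / Nat.sqrt N ≤ N / j := Nat.div_le_div_left hjs (by omega)
      omega
  · rintro ⟨h2x, hx2, hmod⟩
    have hxd : x ∣ N := Nat.dvd_of_mod_eq_zero hmod
    have hxN : N / x * x = N := Nat.div_mul_cancel hxd
    by_cases hxs : x ≤ Nat.sqrt N
    · exact ⟨x, h2x, hxs, hmod, Or.inl rfl⟩
    · push_neg at hxs
      have hx2' : x * 2 ≤ N := (Nat.le_div_iff_mul_le (by omega : (0:Nat) < 2)).mp hx2
      have h2q : 2 ≤ N / x := (Nat.le_div_iff_mul_le (by omega : 0 < x)).mpr (by omega)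
      have hqs : N / x ≤ Nat.sqrt N := by
        by_contra hq
        push_neg at hq
        have h1 : (Nat.sqrt N + 1) * (Nat.sqrt N + 1) ≤ (N / x) * x :=
          Nat.mul_le_mul (by omega) (by omega)
        have h2 := Nat.lt_succ_sqrt N
        simp [Nat.succ_eq_add_one] at h2
        omega
      refine ⟨N / x, h2q, hqs, Nat.mod_eq_zero_of_dvd (Nat.div_dvd_of_dvd hxd), Or.inr ⟨?_, ?_⟩⟩
      · rw [Nat.div_div_self hxd (by omega)]; omega
      · rw [Nat.div_div_self hxd (by omega)]

theorem pvSF_mem (N : Nat) (hs2 : 2 ≤ Nat.sqrt N) (x : Int) :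
    x ∈ pvSF N 2 ↔ ∃ j : Nat, 2 ≤ j ∧ j ≤ Nat.sqrt N ∧ N % j = 0 ∧ x = (j : Int) := by
  unfold pvSF
  rw [List.mem_map]
  constructor
  · rintro ⟨j, hj, rfl⟩
    rw [List.mem_filter, List.mem_range'_1] at hj
    exact ⟨j, hj.1.1, by omega, by simpa using hj.2, rfl⟩
  · rintro ⟨j, hj1, hj2, hm, rfl⟩
    refine ⟨j, ?_, rfl⟩
    rw [List.mem_filter, List.mem_range'_1]
    exact ⟨⟨hj1, by omega⟩, by simpa using hm⟩

theorem pvLF_mem (N : Nat) (hs2 : 2 ≤ Nat.sqrt N) (x : Int) :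
    x ∈ pvLF N 2 ↔ ∃ j : Nat, 2 ≤ j ∧ j ≤ Nat.sqrt N ∧ N % j = 0 ∧ N / j ≠ j ∧ x = ((N / j : Nat) : Int) := by
  simp only [pvLF, List.mem_map, List.mem_filter, List.mem_range'_1, Bool.and_eq_true,
    beq_iff_eq, bne_iff_ne, ne_eq]
  constructor
  · rintro ⟨j, ⟨⟨hj1, hj2⟩, hm, hq⟩, rfl⟩
    exact ⟨j, hj1, by omega, hm, hq, rfl⟩
  · rintro ⟨j, hj1, hj2, hm, hq, rfl⟩
    exact ⟨j, ⟨⟨hj1, by omega⟩, hm, hq⟩, rfl⟩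

-- every cofactor in pvLF is strictly above the square root
theorem pvLF_gt_sqrt (N : Nat) (_hN : 4 ≤ N) {j : Nat} (hj1 : 2 ≤ j) (hjs : j ≤ Nat.sqrt N)
    (hm : N % j = 0) (hq : N / j ≠ j) : Nat.sqrt N < N / j := by
  have hjd : j ∣ N := Nat.dvd_of_mod_eq_zero hm
  have hss : Nat.sqrt N * Nat.sqrt N ≤ N := Nat.sqrt_le N
  have h1 : Nat.sqrt N ≤ N / Nat.sqrt N := (Nat.le_div_iff_mul_le (by omega)).mpr hss
  have h2 : N / Nat.sqrt N ≤ N / j := Nat.div_le_div_left hjs (by omega)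
  rcases Nat.lt_or_ge (Nat.sqrt N) (N / j) with h | h
  · exact h
  · exfalso
    have hqs : N / j = Nat.sqrt N := by omega
    have hNj : N / j * j = N := Nat.div_mul_cancel hjd
    have : Nat.sqrt N ≤ j := by
      by_contra hc
      push_neg at hc
      have : N / j * j < Nat.sqrt N * Nat.sqrt N := by
        rw [hqs]
        nlinarith
      omega
    exact hq (by omega)

theorem pvPairwise_ext (l₁ l₂ : List Int) (h₁ : l₁.Pairwise (· < ·)) (h₂ : l₂.Pairwise (· < ·))
    (hm : ∀ x, x ∈ l₁ ↔ x ∈ l₂) : l₁ = l₂ := by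
  have n₁ : l₁.Nodup := h₁.imp (fun h => ne_of_lt h)
  have n₂ : l₂.Nodup := h₂.imp (fun h => ne_of_lt h)
  exact List.Perm.eq_of_pairwise (fun a b _ _ hab hba => absurd hba (not_lt_of_gt hab)) h₁ h₂
    ((List.perm_ext_iff_of_nodup n₁ n₂).mpr hm)

theorem pvPairwise_pyRange (a b : Int) : (PySem.List.pyRange a b 1).Pairwise (· < ·) := by
  show (PySem.List.pyRange a b 1).Pairwise (· < ·)
  unfold PySem.List.pyRange
  rw [if_neg one_ne_zero]
  exact List.Pairwise.map _ (fun x y h => by omega) (List.pairwise_lt_range)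

theorem pvAltDivs_eq (n : Int) :
    (pvTrialLoop n 2 [] []).1 ++ (pvTrialLoop n 2 [] []).2.reverse = pvDivsA n := by
  by_cases hn : n < 4
  · have hT : pvTrialLoop n 2 [] [] = ([], []) := by
      rw [pvTrialLoop, dif_neg (by omega)]
    have hD : pvDivsA n = [] := by
      unfold pvDivsA
      have hnil : PySem.List.pyRange 2 (PySem.Int.floordiv n 2 + 1) 1 = [] := by
        apply List.eq_nil_iff_forall_not_mem.mpr
        intro x hx
        rw [PySem.List.mem_pyRange_one] at hx
        have h2 : PySem.Int.floordiv n 2 < 2 :=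
          (PySem.Int.floordiv_lt_iff_lt_mul (by omega)).mpr (by omega)
        omega
      rw [hnil]; rfl
    rw [hT, hD]; rfl
  · push_neg at hn
    have hn' : n = ((n.toNat : Nat) : Int) := by omega
    set N := n.toNat with hNdef
    have hN4 : 4 ≤ N := by omega
    have hNne : N ≠ 0 := by omega
    have hs2 : 2 ≤ Nat.sqrt N := Nat.le_sqrt.mpr (by omega)
    have hT := pvTrialLoop_spec N (Nat.sqrt N + 1 - 2) 2 rfl (by omega) [] []
    rw [hn', hT]
    simp only [List.nil_append]
    have hmemF : ∀ j : Nat, j ∈ (List.range' 2 (Nat.sqrt N + 1 - 2)).filter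
        (fun j => N % j == 0 && N / j != j) →
        2 ≤ j ∧ j ≤ Nat.sqrt N ∧ N % j = 0 ∧ N / j ≠ j := by
      intro j hj
      rw [List.mem_filter, List.mem_range'_1] at hj
      obtain ⟨⟨ha, hb⟩, hc⟩ := hj
      simp only [Bool.and_eq_true, beq_iff_eq, bne_iff_ne, ne_eq] at hc
      exact ⟨ha, by omega, hc.1, hc.2⟩
    apply pvPairwise_ext
    · rw [List.pairwise_append]
      refine ⟨?_, ?_, ?_⟩
      · exact List.Pairwise.map _ (fun a b h => by exact_mod_cast h)
          (((List.pairwise_lt_range' 1)).filter _)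
      · rw [List.pairwise_reverse]
        apply List.Pairwise.map (S := fun a b => b < a) _ (fun a b h => h)
        apply List.Pairwise.imp_of_mem
          (fun {a b} ha hb hab => ?_) (((List.pairwise_lt_range' 1)).filter _)
        · -- a < b, both divisor entries → ↑(N/b) < ↑(N/a)
          obtain ⟨ha1, ha2, ha3, _⟩ := hmemF a ha
          obtain ⟨hb1, hb2, hb3, _⟩ := hmemF b hb
          have hle : N / b ≤ N / a := Nat.div_le_div_left (le_of_lt hab) (by omega)
          have hne : N / b ≠ N / a := by
            intro he
            have h1 : N / (N / b) = b := Nat.div_div_self (Nat.dvd_of_mod_eq_zero hb3) hNne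
            have h2 : N / (N / a) = a := Nat.div_div_self (Nat.dvd_of_mod_eq_zero ha3) hNne
            rw [he, h2] at h1
            omega
          exact_mod_cast lt_of_le_of_ne hle hne
      · intro a ha b hb
        rw [pvSF_mem N hs2] at ha
        rw [List.mem_reverse, pvLF_mem N hs2] at hb
        obtain ⟨j, hj1, hj2, hm, rfl⟩ := ha
        obtain ⟨j', hj1', hj2', hm', hq', rfl⟩ := hb
        have := pvLF_gt_sqrt N hN4 hj1' hj2' hm' hq'
        exact_mod_cast by omega
    · exact (pvPairwise_pyRange _ _).filter _
    · intro x
      rw [List.mem_append, List.mem_reverse, pvSF_mem N hs2, pvLF_mem N hs2]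
      have hDmem : x ∈ pvDivsA (N : Int) ↔ 2 ≤ x ∧ x ≤ ((N / 2 : Nat) : Int) ∧ x ∣ (N : Int) := by
        unfold pvDivsA
        rw [List.mem_filter, PySem.List.mem_pyRange_one]
        have hfd : PySem.Int.floordiv (N : Int) 2 = ((N / 2 : Nat) : Int) := by
          exact_mod_cast PySem.Int.floordiv_natCast N 2
        rw [hfd, show ((PySem.Int.mod (N : Int) x == 0) = true) ↔ x ∣ (N : Int) from
          by simp [PySem.Int.mod_eq_zero_iff_dvd]]
        constructor
        · rintro ⟨⟨h1, h2⟩, h3⟩; exact ⟨h1, by omega, h3⟩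
        · rintro ⟨h1, h2, h3⟩; exact ⟨⟨h1, by omega⟩, h3⟩
      rw [hDmem]
      constructor
      · rintro (⟨j, hj1, hj2, hm, rfl⟩ | ⟨j, hj1, hj2, hm, hq, rfl⟩)
        · have hk := (pvKey N hN4 j).mp ⟨j, hj1, hj2, hm, Or.inl rfl⟩
          exact ⟨by exact_mod_cast hk.1, by exact_mod_cast hk.2.1,
            Int.natCast_dvd_natCast.mpr (Nat.dvd_of_mod_eq_zero hk.2.2)⟩
        · have hk := (pvKey N hN4 (N / j)).mp ⟨j, hj1, hj2, hm, Or.inr ⟨hq, rfl⟩⟩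
          exact ⟨by exact_mod_cast hk.1, by exact_mod_cast hk.2.1,
            Int.natCast_dvd_natCast.mpr (Nat.dvd_of_mod_eq_zero hk.2.2)⟩
      · rintro ⟨h1, h2, h3⟩
        have hxe : x = ((x.toNat : Nat) : Int) := by omega
        have hdvd : x.toNat ∣ N := by
          rw [hxe] at h3; exact_mod_cast h3
        have h2' : x.toNat ≤ N / 2 := by omega
        have hk := (pvKey N hN4 x.toNat).mpr
          ⟨by omega, h2', Nat.mod_eq_zero_of_dvd hdvd⟩
        obtain ⟨j, hj1, hj2, hm, hx'⟩ := hk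
        rcases hx' with he | ⟨hq, he⟩
        · exact Or.inl ⟨j, hj1, hj2, hm, by omega⟩
        · exact Or.inr ⟨j, hj1, hj2, hm, hq, by rw [hxe, he]⟩

theorem pvInner_spec (pre rest : List Int) (n : Int) :
    ∀ (js ds : List Int),
      js.foldl (pvInnerStepA pre.length) (ds.length, pre ++ n :: (ds ++ rest)) =
        (ds.length + (js.filter (fun j => PySem.Int.mod n j == 0)).length,
         pre ++ n :: ((ds ++ js.filter (fun j => PySem.Int.mod n j == 0)) ++ rest)) := by
  intro js
  induction js with
  | nil => intro ds; simp
  | cons j js ih =>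
      intro ds
      have hget : (PySem.List.pyGet? (pre ++ n :: (ds ++ rest)) ((pre.length : Nat) : Int)).getD 0 = n := by
        rw [PySem.List.pyGet?_natCast]
        simp
      simp only [List.foldl_cons, pvInnerStepA, hget]
      by_cases hj : PySem.Int.mod n j == 0
      · rw [if_pos hj]
        have hins : PySem.List.insert (pre ++ n :: (ds ++ rest))
            ((pre.length + ds.length + 1 : Nat) : Int) j = pre ++ n :: ((ds ++ [j]) ++ rest) := by
          rw [PySem.List.insert_natCast _ _ _ (by simp)]
          have h1 : List.take (pre.length + ds.length + 1) (pre ++ n :: (ds ++ rest)) = pre ++ n :: ds := by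
            have : (pre ++ n :: ds).length = pre.length + ds.length + 1 := by simp; omega
            rw [show pre ++ n :: (ds ++ rest) = (pre ++ n :: ds) ++ rest by simp,
               List.take_left' this]
          have h2 : List.drop (pre.length + ds.length + 1) (pre ++ n :: (ds ++ rest)) = rest := by
            have : (pre ++ n :: ds).length = pre.length + ds.length + 1 := by simp; omega
            rw [show pre ++ n :: (ds ++ rest) = (pre ++ n :: ds) ++ rest by simp,
               List.drop_left' this]
          rw [h1, h2]; simp
        rw [hins]
        have := ih (ds ++ [j])
        simp only [List.length_append, List.length_cons, List.length_nil, List.append_assoc,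
          Nat.zero_add] at this
        simp only [List.append_assoc]
        rw [this]
        simp only [List.filter_cons, hj, if_pos, List.cons_append, List.nil_append,
          List.length_cons, Prod.mk.injEq]
        exact ⟨by omega, trivial⟩
      · rw [if_neg hj]
        rw [ih ds]
        simp only [List.filter_cons]
        simp [hj]

theorem pvLoopA_spec : ∀ (rest pre : List Int),
    pvLoopA (pre ++ rest) pre.length = pre ++ rest.flatMap (fun n => n :: pvDivsA n) := by
  intro rest
  induction rest with
  | nil => intro pre; rw [pvLoopA]; simp
  | cons n rest ih =>
      intro pre
      rw [pvLoopA]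
      rw [dif_pos (by simp)]
      have hget : (PySem.List.pyGet? (pre ++ n :: rest) ((pre.length : Nat) : Int)).getD 0 = n := by
        rw [PySem.List.pyGet?_natCast]; simp
      simp only [hget]
      have hfold := pvInner_spec pre rest n
        (PySem.List.pyRange 2 (PySem.Int.floordiv n 2 + 1) 1) []
      simp only [List.length_nil, List.nil_append, Nat.zero_add] at hfold
      simp only [hfold]
      have := ih (pre ++ n :: pvDivsA n)
      simp only [List.append_assoc, List.cons_append] at this ⊢
      rw [show (List.filter (fun j => PySem.Int.mod n j == 0)
          (PySem.List.pyRange 2 (PySem.Int.floordiv n 2 + 1))) = pvDivsA n from rfl]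
      rw [show pre.length + 1 + (pvDivsA n).length = (pre ++ n :: pvDivsA n).length by simp; omega]
      rw [show pre ++ n :: (pvDivsA n ++ rest) = (pre ++ n :: pvDivsA n) ++ rest by simp]
      rw [ih (pre ++ n :: pvDivsA n)]
      simp

-- ===== VERDICT (by name: the statement is the Claim_ definition above) =====
theorem inserare_divizori_proprii_spec : Claim_equal_inserare_divizori_proprii := by
  intro lst _
  unfold Spec_inserare_divizori_proprii inserare_divizori_proprii inserare_divizori_proprii_alt
  have hB : lst.foldl (fun out n =>
      let sl := pvTrialLoop n 2 [] []
      out ++ ([n] ++ sl.1 ++ sl.2.reverse)) [] = lst.flatMap (fun n => n :: pvDivsA n) := by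
    have := PySem.List.foldl_append_eq_flatMap
      (fun n => [n] ++ (pvTrialLoop n 2 [] []).1 ++ (pvTrialLoop n 2 [] []).2.reverse) lst []
    simp only [List.nil_append] at this
    rw [this]
    exact List.flatMap_congr (fun n _ => by
      rw [List.append_assoc, pvAltDivs_eq n]
      rfl)
  rw [hB]
  simpa using pvLoopA_spec lst []
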